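-- pv_equiv track=rewrite | github.com/MrBrantCode/unitest_baseline | mut_generate/mist_train_taco/taco_523/solution.py | count_groups_divisible_by_three
-- ===== SOURCE A (Python) =====
-- def count_groups_divisible_by_three(arr, n):
--     c = [0, 0, 0]
--     res = 0
--
--     # Count the number of elements that give remainder 0, 1, and 2 when divided by 3
--     for i in range(n):
--         c[arr[i] % 3] += 1
--
--     # Calculate the number of groups of 2 or 3 whose sum is divisible by 3
--     res += (c[0] * (c[0] - 1)) // 2
--     res += c[1] * c[2]
--     res += (c[0] * (c[0] - 1) * (c[0] - 2)) // 6
--     res += (c[1] * (c[1] - 1) * (c[1] - 2)) // 6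
--     res += (c[2] * (c[2] - 1) * (c[2] - 2)) // 6
--     res += c[0] * c[1] * c[2]
--
--     return res
-- ===== SOURCE B (Python) =====
-- def count_groups_divisible_by_three(arr, n):
--     # One left-to-right pass: s0/s1/s2 count elements seen so far by residue,
--     # p0/p1/p2 count pairs seen so far by the residue of their sum; each new
--     # element closes the pairs and triples it completes.
--     s0 = s1 = s2 = 0
--     p0 = p1 = p2 = 0
--     total = 0
--     for i in range(n):
--         r = arr[i] % 3
--         if r == 0:
--             total += s0 + p0
--             p0, p1, p2 = p0 + s0, p1 + s1, p2 + s2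
--             s0 += 1
--         elif r == 1:
--             total += s2 + p2
--             p0, p1, p2 = p0 + s2, p1 + s0, p2 + s1
--             s1 += 1
--         else:
--             total += s1 + p1
--             p0, p1, p2 = p0 + s1, p1 + s2, p2 + s0
--             s2 += 1
--     return total
-- ===== Notes on version B (the rewrite author's own statement) =====
-- stated objective: alternative
-- what changed: A tallies residue counts and then applies closed-form binomial formulas with integer division; B is a single streaming pass that maintains counts of seen elements and seen pairs by residue and adds, for each new element, the pairs and triples it completes, using no division or product formulas.
import Mathlib
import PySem

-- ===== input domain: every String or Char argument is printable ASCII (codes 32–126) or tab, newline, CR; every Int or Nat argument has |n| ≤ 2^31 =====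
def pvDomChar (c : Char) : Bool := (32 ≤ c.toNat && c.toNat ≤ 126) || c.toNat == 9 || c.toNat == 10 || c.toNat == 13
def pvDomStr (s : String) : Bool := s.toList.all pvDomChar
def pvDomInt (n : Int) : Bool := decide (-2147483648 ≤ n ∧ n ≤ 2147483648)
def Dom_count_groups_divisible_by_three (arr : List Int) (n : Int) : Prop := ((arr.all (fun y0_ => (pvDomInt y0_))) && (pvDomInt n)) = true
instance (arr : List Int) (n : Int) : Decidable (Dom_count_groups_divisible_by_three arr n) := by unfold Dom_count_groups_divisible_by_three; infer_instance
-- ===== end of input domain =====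

-- B replaces A's residue tally + closed-form binomial formulas by a single streaming
-- pass that counts, per residue, the elements and pairs seen so far (objective: alternative).

-- ===== PORT A =====
-- loop body: c[arr[i] % 3] += 1  (c is a 3-slot table; the index arr[i] % 3 is 0, 1 or 2)
def pvStepA (c : Int × Int × Int) (x : Int) : Int × Int × Int :=
  let r := PySem.Int.mod x 3
  if r = 0 then (c.1 + 1, c.2.1, c.2.2)
  else if r = 1 then (c.1, c.2.1 + 1, c.2.2)
  else (c.1, c.2.1, c.2.2 + 1)

-- res = 0 then the six '+=' of A, in order
def pvResA (c : Int × Int × Int) : Int :=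
  0 + PySem.Int.floordiv (c.1 * (c.1 - 1)) 2
    + c.2.1 * c.2.2
    + PySem.Int.floordiv (c.1 * (c.1 - 1) * (c.1 - 2)) 6
    + PySem.Int.floordiv (c.2.1 * (c.2.1 - 1) * (c.2.1 - 2)) 6
    + PySem.Int.floordiv (c.2.2 * (c.2.2 - 1) * (c.2.2 - 2)) 6
    + c.1 * c.2.1 * c.2.2

def count_groups_divisible_by_three (arr : List Int) (n : Int) : Int :=
  pvResA ((PySem.List.pyRange 0 n 1).foldl
    (fun c i => pvStepA c (PySem.List.pyGetD arr i 0)) (0, 0, 0))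

-- ===== PORT B =====
-- state (total, s0, s1, s2, p0, p1, p2): B's seven scalar variables
def pvStepB (st : Int × Int × Int × Int × Int × Int × Int) (x : Int) :
    Int × Int × Int × Int × Int × Int × Int :=
  match st with
  | (t, s0, s1, s2, p0, p1, p2) =>
    let r := PySem.Int.mod x 3
    if r = 0 then (t + (s0 + p0), s0 + 1, s1, s2, p0 + s0, p1 + s1, p2 + s2)
    else if r = 1 then (t + (s2 + p2), s0, s1 + 1, s2, p0 + s2, p1 + s0, p2 + s1)
    else (t + (s1 + p1), s0, s1, s2 + 1, p0 + s1, p1 + s2, p2 + s0)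

def count_groups_divisible_by_three_alt (arr : List Int) (n : Int) : Int :=
  ((PySem.List.pyRange 0 n 1).foldl
    (fun st i => pvStepB st (PySem.List.pyGetD arr i 0)) (0, 0, 0, 0, 0, 0, 0)).1

-- ===== PRECONDITION & SPEC =====
-- A raises IndexError iff its loop reaches an index ≥ len(arr), i.e. iff n > len(arr); only those inputs are excluded.
def Pre_count_groups_divisible_by_three (arr : List Int) (n : Int) : Prop := n ≤ (arr.length : Int)
instance (arr : List Int) (n : Int) : Decidable (Pre_count_groups_divisible_by_three arr n) := by
  unfold Pre_count_groups_divisible_by_three; infer_instance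
def pvWitness_count_groups_divisible_by_three : List Int × Int := ([3, 1, 2, 5], 4)

def Spec_count_groups_divisible_by_three (arr : List Int) (n : Int) (out : Int) : Prop := out = count_groups_divisible_by_three_alt arr n
instance (arr : List Int) (n : Int) (out : Int) : Decidable (Spec_count_groups_divisible_by_three arr n out) := by unfold Spec_count_groups_divisible_by_three; infer_instance

-- ===== CLAIM (what is proved, stated in full; the proofs are below) =====
def Claim_equal_count_groups_divisible_by_three : Prop := ∀ (arr : List Int) (n : Int), Dom_count_groups_divisible_by_three arr n → Pre_count_groups_divisible_by_three arr n → Spec_count_groups_divisible_by_three arr n (count_groups_divisible_by_three arr n)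

-- ===== LEMMAS AND PROOFS =====

-- number of elements of xs with residue r mod 3
def pvCnt (r : Int) (xs : List Int) : Nat := xs.countP (fun y => decide (PySem.Int.mod y 3 = r))
-- number of index pairs i < j with (xs[i]+xs[j]) % 3 == t
def pvPcnt (t : Int) : List Int → Nat
  | [] => 0
  | x :: l => pvCnt (PySem.Int.mod (t - x) 3) l + pvPcnt t l
-- number of index triples i < j < k with sum % 3 == 0
def pvTcnt : List Int → Nat
  | [] => 0
  | x :: l => pvPcnt (PySem.Int.mod (-x) 3) l + pvTcnt l

def pvState (l : List Int) : Int × Int × Int × Int × Int × Int × Int :=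
  ((pvPcnt 0 l + pvTcnt l : Nat), (pvCnt 0 l : Nat), (pvCnt 1 l : Nat), (pvCnt 2 l : Nat),
   (pvPcnt 0 l : Nat), (pvPcnt 1 l : Nat), (pvPcnt 2 l : Nat))

theorem pvMod3_cases (x : Int) : PySem.Int.mod x 3 = 0 ∨ PySem.Int.mod x 3 = 1 ∨ PySem.Int.mod x 3 = 2 := by
  have h1 : (0 : Int) ≤ PySem.Int.mod x 3 := PySem.Int.mod_nonneg x (by norm_num)
  have h2 : PySem.Int.mod x 3 < 3 := PySem.Int.mod_lt x (by norm_num)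
  omega

theorem pvModSub (c x : Int) : PySem.Int.mod (c - x) 3 = PySem.Int.mod (c - PySem.Int.mod x 3) 3 := by
  simp only [PySem.Int.mod_eq_emod_of_pos (show (0:Int) < 3 by norm_num)]; omega

theorem pvModNeg (x : Int) : PySem.Int.mod (-x) 3 = PySem.Int.mod (3 - PySem.Int.mod x 3) 3 := by
  simp only [PySem.Int.mod_eq_emod_of_pos (show (0:Int) < 3 by norm_num)]; omega

theorem pvModSwap (t a x : Int) :
    (PySem.Int.mod x 3 = PySem.Int.mod (t - a) 3) ↔ (PySem.Int.mod a 3 = PySem.Int.mod (t - x) 3) := by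
  simp only [PySem.Int.mod_eq_emod_of_pos (show (0:Int) < 3 by norm_num)]; omega

theorem pvCnt_cons (r x : Int) (l : List Int) :
    pvCnt r (x :: l) = pvCnt r l + (if PySem.Int.mod x 3 = r then 1 else 0) := by
  simp [pvCnt, List.countP_cons]

theorem pvCnt_append (r : Int) (l : List Int) (x : Int) :
    pvCnt r (l ++ [x]) = pvCnt r l + (if PySem.Int.mod x 3 = r then 1 else 0) := by
  simp [pvCnt, List.countP_append, List.countP_cons]

theorem pvPcnt_append (t : Int) (l : List Int) (x : Int) :
    pvPcnt t (l ++ [x]) = pvPcnt t l + pvCnt (PySem.Int.mod (t - x) 3) l := by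
  induction l with
  | nil => simp [pvPcnt, pvCnt]
  | cons a l ih =>
      rw [List.cons_append, pvPcnt, pvPcnt, ih, pvCnt_append, pvCnt_cons]
      rw [if_congr (pvModSwap t a x) rfl rfl]
      omega

theorem pvTcnt_append (l : List Int) (x : Int) :
    pvTcnt (l ++ [x]) = pvTcnt l + pvPcnt (PySem.Int.mod (-x) 3) l := by
  induction l with
  | nil => simp [pvTcnt, pvPcnt]
  | cons a l ih =>
      rw [List.cons_append, pvTcnt, pvTcnt, ih, pvPcnt_append, pvPcnt]
      have key : PySem.Int.mod (PySem.Int.mod (-a) 3 - x) 3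
               = PySem.Int.mod (PySem.Int.mod (-x) 3 - a) 3 := by
        simp only [PySem.Int.mod_eq_emod_of_pos (show (0:Int) < 3 by norm_num)]; omega
      rw [key]; omega

theorem pvStepB_state (pre : List Int) (x : Int) :
    pvStepB (pvState pre) x = pvState (pre ++ [x]) := by
  rcases pvMod3_cases x with h | h | h
  · have a1 : PySem.Int.mod ((1:Int) - x) 3 = 1 := by rw [pvModSub, h]; decide
    have a2 : PySem.Int.mod ((2:Int) - x) 3 = 2 := by rw [pvModSub, h]; decide
    have an : PySem.Int.mod (-x) 3 = 0 := by rw [pvModNeg, h]; decide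
    simp only [pvStepB, pvState, h, pvCnt_append, pvPcnt_append, pvTcnt_append,
      zero_sub, a1, a2, an, show ((0:Int)=0)=True from by norm_num, show ((1:Int)=1)=True from by norm_num,
      show ((2:Int)=2)=True from by norm_num, show ((0:Int)=1)=False from by norm_num,
      show ((0:Int)=2)=False from by norm_num, show ((1:Int)=0)=False from by norm_num,
      show ((1:Int)=2)=False from by norm_num, show ((2:Int)=0)=False from by norm_num,
      show ((2:Int)=1)=False from by norm_num, if_true, if_false, Prod.mk.injEq]
    refine ⟨by push_cast; omega, by push_cast; omega, by push_cast; omega, by push_cast; omega,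
      by push_cast; omega, by push_cast; omega, by push_cast; omega⟩
  · have a1 : PySem.Int.mod ((1:Int) - x) 3 = 0 := by rw [pvModSub, h]; decide
    have a2 : PySem.Int.mod ((2:Int) - x) 3 = 1 := by rw [pvModSub, h]; decide
    have an : PySem.Int.mod (-x) 3 = 2 := by rw [pvModNeg, h]; decide
    simp only [pvStepB, pvState, h, pvCnt_append, pvPcnt_append, pvTcnt_append,
      zero_sub, a1, a2, an, show ((0:Int)=0)=True from by norm_num, show ((1:Int)=1)=True from by norm_num,
      show ((2:Int)=2)=True from by norm_num, show ((0:Int)=1)=False from by norm_num,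
      show ((0:Int)=2)=False from by norm_num, show ((1:Int)=0)=False from by norm_num,
      show ((1:Int)=2)=False from by norm_num, show ((2:Int)=0)=False from by norm_num,
      show ((2:Int)=1)=False from by norm_num, if_true, if_false, Prod.mk.injEq]
    refine ⟨by push_cast; omega, by push_cast; omega, by push_cast; omega, by push_cast; omega,
      by push_cast; omega, by push_cast; omega, by push_cast; omega⟩
  · have a1 : PySem.Int.mod ((1:Int) - x) 3 = 2 := by rw [pvModSub, h]; decide
    have a2 : PySem.Int.mod ((2:Int) - x) 3 = 0 := by rw [pvModSub, h]; decide
    have an : PySem.Int.mod (-x) 3 = 1 := by rw [pvModNeg, h]; decide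
    simp only [pvStepB, pvState, h, pvCnt_append, pvPcnt_append, pvTcnt_append,
      zero_sub, a1, a2, an, show ((0:Int)=0)=True from by norm_num, show ((1:Int)=1)=True from by norm_num,
      show ((2:Int)=2)=True from by norm_num, show ((0:Int)=1)=False from by norm_num,
      show ((0:Int)=2)=False from by norm_num, show ((1:Int)=0)=False from by norm_num,
      show ((1:Int)=2)=False from by norm_num, show ((2:Int)=0)=False from by norm_num,
      show ((2:Int)=1)=False from by norm_num, if_true, if_false, Prod.mk.injEq]
    refine ⟨by push_cast; omega, by push_cast; omega, by push_cast; omega, by push_cast; omega,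
      by push_cast; omega, by push_cast; omega, by push_cast; omega⟩

theorem pvFoldB (xs : List Int) : ∀ (pre : List Int),
    xs.foldl pvStepB (pvState pre) = pvState (pre ++ xs) := by
  induction xs with
  | nil => intro pre; simp
  | cons x xs ih =>
      intro pre
      rw [List.foldl_cons, pvStepB_state, ih (pre ++ [x])]
      simp

theorem pvFoldA (xs : List Int) : ∀ (a b c : Int),
    xs.foldl pvStepA (a, b, c) = (a + (pvCnt 0 xs : Nat), b + (pvCnt 1 xs : Nat), c + (pvCnt 2 xs : Nat)) := by
  induction xs with
  | nil => intro a b c; simp [pvCnt]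
  | cons x xs ih =>
      intro a b c
      rcases pvMod3_cases x with h | h | h <;>
        (rw [List.foldl_cons]
         simp only [pvStepA, h, ih, pvCnt_cons, Prod.mk.injEq]
         split_ifs <;> (push_cast; omega))

-- 2 * C(n,2) and 6 * C(n,3) without Nat subtraction
theorem pvChoose2 (k : Nat) : (k + 1).choose 2 * 2 = (k + 1) * k := by
  induction k with
  | zero => decide
  | succ k ih =>
      rw [show k + 1 + 1 = (k + 1) + 1 from rfl, Nat.choose_succ_succ, Nat.choose_one_right,
        Nat.add_mul, ih]
      ring

theorem pvChoose3 (k : Nat) : (k + 2).choose 3 * 6 = (k + 2) * (k + 1) * k := by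
  induction k with
  | zero => decide
  | succ k ih =>
      rw [show k + 1 + 2 = (k + 2) + 1 from rfl, Nat.choose_succ_succ, Nat.add_mul, ih]
      have h2 : (k + 2).choose 2 * 6 = (k + 2) * (k + 1) * 3 := by
        rw [show (k + 2).choose 2 * 6 = (k + 2).choose 2 * 2 * 3 from by ring, pvChoose2 (k + 1)]
      rw [h2]; ring

theorem pvFd2 (c : Nat) : PySem.Int.floordiv ((c : Int) * ((c : Int) - 1)) 2 = ((c.choose 2 : Nat) : Int) := by
  cases c with
  | zero => decide
  | succ k =>
      have e : ((k + 1 : Nat) : Int) * (((k + 1 : Nat) : Int) - 1) = (((k + 1) * k : Nat) : Int) := by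
        push_cast; ring
      rw [e, PySem.Int.floordiv_eq_ediv_of_pos (by norm_num)]
      have := pvChoose2 k
      omega

theorem pvFd3 (c : Nat) : PySem.Int.floordiv ((c : Int) * ((c : Int) - 1) * ((c : Int) - 2)) 6 = ((c.choose 3 : Nat) : Int) := by
  match c with
  | 0 => decide
  | 1 => decide
  | (k + 2) =>
      have e : ((k + 2 : Nat) : Int) * (((k + 2 : Nat) : Int) - 1) * (((k + 2 : Nat) : Int) - 2)
          = (((k + 2) * (k + 1) * k : Nat) : Int) := by push_cast; ring
      rw [e, PySem.Int.floordiv_eq_ediv_of_pos (by norm_num)]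
      have := pvChoose3 k
      omega

theorem pvPcnt0 (xs : List Int) : pvPcnt 0 xs = (pvCnt 0 xs).choose 2 + pvCnt 1 xs * pvCnt 2 xs := by
  induction xs with
  | nil => simp [pvPcnt, pvCnt]
  | cons x l ih =>
      rcases pvMod3_cases x with h | h | h
      · have a0 : PySem.Int.mod ((0:Int) - x) 3 = 0 := by rw [pvModSub, h]; decide
        rw [pvPcnt, a0, ih, pvCnt_cons, pvCnt_cons, pvCnt_cons, h]
        simp only [show ((0:Int)=0)=True from by norm_num, show ((1:Int)=1)=True from by norm_num,
          show ((2:Int)=2)=True from by norm_num, show ((0:Int)=1)=False from by norm_num,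
          show ((0:Int)=2)=False from by norm_num, show ((1:Int)=0)=False from by norm_num,
          show ((1:Int)=2)=False from by norm_num, show ((2:Int)=0)=False from by norm_num,
          show ((2:Int)=1)=False from by norm_num, if_true, if_false,
          Nat.choose_succ_succ, Nat.choose_one_right]
        ring
      · have a0 : PySem.Int.mod ((0:Int) - x) 3 = 2 := by rw [pvModSub, h]; decide
        rw [pvPcnt, a0, ih, pvCnt_cons, pvCnt_cons, pvCnt_cons, h]
        simp only [show ((0:Int)=0)=True from by norm_num, show ((1:Int)=1)=True from by norm_num,
          show ((2:Int)=2)=True from by norm_num, show ((0:Int)=1)=False from by norm_num,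
          show ((0:Int)=2)=False from by norm_num, show ((1:Int)=0)=False from by norm_num,
          show ((1:Int)=2)=False from by norm_num, show ((2:Int)=0)=False from by norm_num,
          show ((2:Int)=1)=False from by norm_num, if_true, if_false,
          Nat.choose_succ_succ, Nat.choose_one_right]
        ring
      · have a0 : PySem.Int.mod ((0:Int) - x) 3 = 1 := by rw [pvModSub, h]; decide
        rw [pvPcnt, a0, ih, pvCnt_cons, pvCnt_cons, pvCnt_cons, h]
        simp only [show ((0:Int)=0)=True from by norm_num, show ((1:Int)=1)=True from by norm_num,
          show ((2:Int)=2)=True from by norm_num, show ((0:Int)=1)=False from by norm_num,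
          show ((0:Int)=2)=False from by norm_num, show ((1:Int)=0)=False from by norm_num,
          show ((1:Int)=2)=False from by norm_num, show ((2:Int)=0)=False from by norm_num,
          show ((2:Int)=1)=False from by norm_num, if_true, if_false,
          Nat.choose_succ_succ, Nat.choose_one_right]
        ring

theorem pvPcnt1 (xs : List Int) : pvPcnt 1 xs = (pvCnt 2 xs).choose 2 + pvCnt 0 xs * pvCnt 1 xs := by
  induction xs with
  | nil => simp [pvPcnt, pvCnt]
  | cons x l ih =>
      rcases pvMod3_cases x with h | h | h
      · have a0 : PySem.Int.mod ((1:Int) - x) 3 = 1 := by rw [pvModSub, h]; decide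
        rw [pvPcnt, a0, ih, pvCnt_cons, pvCnt_cons, pvCnt_cons, h]
        simp only [show ((0:Int)=0)=True from by norm_num, show ((1:Int)=1)=True from by norm_num,
          show ((2:Int)=2)=True from by norm_num, show ((0:Int)=1)=False from by norm_num,
          show ((0:Int)=2)=False from by norm_num, show ((1:Int)=0)=False from by norm_num,
          show ((1:Int)=2)=False from by norm_num, show ((2:Int)=0)=False from by norm_num,
          show ((2:Int)=1)=False from by norm_num, if_true, if_false,
          Nat.choose_succ_succ, Nat.choose_one_right]
        ring
      · have a0 : PySem.Int.mod ((1:Int) - x) 3 = 0 := by rw [pvModSub, h]; decide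
        rw [pvPcnt, a0, ih, pvCnt_cons, pvCnt_cons, pvCnt_cons, h]
        simp only [show ((0:Int)=0)=True from by norm_num, show ((1:Int)=1)=True from by norm_num,
          show ((2:Int)=2)=True from by norm_num, show ((0:Int)=1)=False from by norm_num,
          show ((0:Int)=2)=False from by norm_num, show ((1:Int)=0)=False from by norm_num,
          show ((1:Int)=2)=False from by norm_num, show ((2:Int)=0)=False from by norm_num,
          show ((2:Int)=1)=False from by norm_num, if_true, if_false,
          Nat.choose_succ_succ, Nat.choose_one_right]
        ring
      · have a0 : PySem.Int.mod ((1:Int) - x) 3 = 2 := by rw [pvModSub, h]; decide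
        rw [pvPcnt, a0, ih, pvCnt_cons, pvCnt_cons, pvCnt_cons, h]
        simp only [show ((0:Int)=0)=True from by norm_num, show ((1:Int)=1)=True from by norm_num,
          show ((2:Int)=2)=True from by norm_num, show ((0:Int)=1)=False from by norm_num,
          show ((0:Int)=2)=False from by norm_num, show ((1:Int)=0)=False from by norm_num,
          show ((1:Int)=2)=False from by norm_num, show ((2:Int)=0)=False from by norm_num,
          show ((2:Int)=1)=False from by norm_num, if_true, if_false,
          Nat.choose_succ_succ, Nat.choose_one_right]
        ring

theorem pvPcnt2 (xs : List Int) : pvPcnt 2 xs = (pvCnt 1 xs).choose 2 + pvCnt 0 xs * pvCnt 2 xs := by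
  induction xs with
  | nil => simp [pvPcnt, pvCnt]
  | cons x l ih =>
      rcases pvMod3_cases x with h | h | h
      · have a0 : PySem.Int.mod ((2:Int) - x) 3 = 2 := by rw [pvModSub, h]; decide
        rw [pvPcnt, a0, ih, pvCnt_cons, pvCnt_cons, pvCnt_cons, h]
        simp only [show ((0:Int)=0)=True from by norm_num, show ((1:Int)=1)=True from by norm_num,
          show ((2:Int)=2)=True from by norm_num, show ((0:Int)=1)=False from by norm_num,
          show ((0:Int)=2)=False from by norm_num, show ((1:Int)=0)=False from by norm_num,
          show ((1:Int)=2)=False from by norm_num, show ((2:Int)=0)=False from by norm_num,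
          show ((2:Int)=1)=False from by norm_num, if_true, if_false,
          Nat.choose_succ_succ, Nat.choose_one_right]
        ring
      · have a0 : PySem.Int.mod ((2:Int) - x) 3 = 1 := by rw [pvModSub, h]; decide
        rw [pvPcnt, a0, ih, pvCnt_cons, pvCnt_cons, pvCnt_cons, h]
        simp only [show ((0:Int)=0)=True from by norm_num, show ((1:Int)=1)=True from by norm_num,
          show ((2:Int)=2)=True from by norm_num, show ((0:Int)=1)=False from by norm_num,
          show ((0:Int)=2)=False from by norm_num, show ((1:Int)=0)=False from by norm_num,
          show ((1:Int)=2)=False from by norm_num, show ((2:Int)=0)=False from by norm_num,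
          show ((2:Int)=1)=False from by norm_num, if_true, if_false,
          Nat.choose_succ_succ, Nat.choose_one_right]
        ring
      · have a0 : PySem.Int.mod ((2:Int) - x) 3 = 0 := by rw [pvModSub, h]; decide
        rw [pvPcnt, a0, ih, pvCnt_cons, pvCnt_cons, pvCnt_cons, h]
        simp only [show ((0:Int)=0)=True from by norm_num, show ((1:Int)=1)=True from by norm_num,
          show ((2:Int)=2)=True from by norm_num, show ((0:Int)=1)=False from by norm_num,
          show ((0:Int)=2)=False from by norm_num, show ((1:Int)=0)=False from by norm_num,
          show ((1:Int)=2)=False from by norm_num, show ((2:Int)=0)=False from by norm_num,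
          show ((2:Int)=1)=False from by norm_num, if_true, if_false,
          Nat.choose_succ_succ, Nat.choose_one_right]
        ring

theorem pvTcnt_eq (xs : List Int) : pvTcnt xs = (pvCnt 0 xs).choose 3 + (pvCnt 1 xs).choose 3 + (pvCnt 2 xs).choose 3 + pvCnt 0 xs * pvCnt 1 xs * pvCnt 2 xs := by
  induction xs with
  | nil => simp [pvTcnt, pvCnt]
  | cons x l ih =>
      rcases pvMod3_cases x with h | h | h
      · have an : PySem.Int.mod (-x) 3 = 0 := by rw [pvModNeg, h]; decide
        rw [pvTcnt, an, pvPcnt0, ih, pvCnt_cons, pvCnt_cons, pvCnt_cons, h]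
        simp only [show ((0:Int)=0)=True from by norm_num, show ((1:Int)=1)=True from by norm_num,
          show ((2:Int)=2)=True from by norm_num, show ((0:Int)=1)=False from by norm_num,
          show ((0:Int)=2)=False from by norm_num, show ((1:Int)=0)=False from by norm_num,
          show ((1:Int)=2)=False from by norm_num, show ((2:Int)=0)=False from by norm_num,
          show ((2:Int)=1)=False from by norm_num, if_true, if_false,
          Nat.choose_succ_succ, Nat.choose_one_right]
        ring
      · have an : PySem.Int.mod (-x) 3 = 2 := by rw [pvModNeg, h]; decide
        rw [pvTcnt, an, pvPcnt2, ih, pvCnt_cons, pvCnt_cons, pvCnt_cons, h]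
        simp only [show ((0:Int)=0)=True from by norm_num, show ((1:Int)=1)=True from by norm_num,
          show ((2:Int)=2)=True from by norm_num, show ((0:Int)=1)=False from by norm_num,
          show ((0:Int)=2)=False from by norm_num, show ((1:Int)=0)=False from by norm_num,
          show ((1:Int)=2)=False from by norm_num, show ((2:Int)=0)=False from by norm_num,
          show ((2:Int)=1)=False from by norm_num, if_true, if_false,
          Nat.choose_succ_succ, Nat.choose_one_right]
        ring
      · have an : PySem.Int.mod (-x) 3 = 1 := by rw [pvModNeg, h]; decide
        rw [pvTcnt, an, pvPcnt1, ih, pvCnt_cons, pvCnt_cons, pvCnt_cons, h]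
        simp only [show ((0:Int)=0)=True from by norm_num, show ((1:Int)=1)=True from by norm_num,
          show ((2:Int)=2)=True from by norm_num, show ((0:Int)=1)=False from by norm_num,
          show ((0:Int)=2)=False from by norm_num, show ((1:Int)=0)=False from by norm_num,
          show ((1:Int)=2)=False from by norm_num, show ((2:Int)=0)=False from by norm_num,
          show ((2:Int)=1)=False from by norm_num, if_true, if_false,
          Nat.choose_succ_succ, Nat.choose_one_right]
        ring

-- ===== VERDICT (by name: the statement is the Claim_ definition above) =====
theorem count_groups_divisible_by_three_spec : Claim_equal_count_groups_divisible_by_three := by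
  intro arr n _ _
  unfold Spec_count_groups_divisible_by_three
  unfold count_groups_divisible_by_three count_groups_divisible_by_three_alt
  have hA0 : (PySem.List.pyRange 0 n 1).foldl
      (fun c i => pvStepA c (PySem.List.pyGetD arr i 0)) (0, 0, 0)
      = ((PySem.List.pyRange 0 n 1).map (fun j => PySem.List.pyGetD arr j 0)).foldl pvStepA (0, 0, 0) := by
    rw [List.foldl_map]
  have hB0 : (PySem.List.pyRange 0 n 1).foldl
      (fun st i => pvStepB st (PySem.List.pyGetD arr i 0)) (0, 0, 0, 0, 0, 0, 0)
      = ((PySem.List.pyRange 0 n 1).map (fun j => PySem.List.pyGetD arr j 0)).foldl pvStepB (0, 0, 0, 0, 0, 0, 0) := by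
    rw [List.foldl_map]
  rw [hA0, hB0]
  set xs := (PySem.List.pyRange 0 n 1).map (fun j => PySem.List.pyGetD arr j 0) with hxs
  have hB1 : xs.foldl pvStepB (0, 0, 0, 0, 0, 0, 0) = pvState xs := by
    have : ((0, 0, 0, 0, 0, 0, 0) : Int × Int × Int × Int × Int × Int × Int) = pvState [] := by
      simp [pvState, pvPcnt, pvTcnt, pvCnt]
    rw [this, pvFoldB xs []]
    simp
  rw [hB1, pvFoldA xs 0 0 0]
  simp only [pvResA, pvState, zero_add]
  rw [pvFd2, pvFd3, pvFd3, pvFd3]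
  have h0 := pvPcnt0 xs
  have h4 := pvTcnt_eq xs
  push_cast
  rw [h0, h4]
  push_cast
  ring
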